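-- pv_equiv track=rewrite | github.com/ErwanBeurier/pokemon-essentials | STRAT/Python/type_handler.py | compareCoverage
-- ===== SOURCE A (Python) =====
-- def compareCoverage(coverage1, coverage2, has_high_coverage):
-- 	# -1 = coverage1 is better than coverage2
-- 	# 0 = same coverage
-- 	# 1 = coverage2 is better than coverage1
-- 	res = [0, 0, 0, 0]
--
-- 	for i in range(len(coverage1)):
-- 		if i == 0 and not has_high_coverage:
-- 			if len(coverage1[i]) + 1 < len(coverage2[i]):
-- 				res[i] = 1
-- 			elif len(coverage1[i]) > len(coverage2[i]) +1 :
-- 				res[i] = -1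
-- 		else:
-- 			if len(coverage1[i]) < len(coverage2[i]):
-- 				res[i] = 1
-- 			elif len(coverage1[i]) > len(coverage2[i]):
-- 				res[i] = -1
--
--
-- 	# 0: t hits super effective on the list of types
-- 	# if res[0] == 0:
-- 		# return 0
-- 	# 1: t hits normal
-- 	# 2: t is resisted by the list of types
-- 	# 3: the list of types is immune.
--
-- 	# For now, res[0] (comparison of super-effectiveness) is the only that matters.
--
-- 	return res[0]
-- ===== SOURCE B (Python) =====
-- def compareCoverage(coverage1, coverage2, has_high_coverage):
--     # Only the super-effective slot (index 0) determines the result: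
--     # compare the two head lengths directly, with a slack of 1 unless
--     # has_high_coverage.
--     if not coverage1:
--         return 0
--     margin = 0 if has_high_coverage else 1
--     d = len(coverage2[0]) - len(coverage1[0])
--     if d > margin:
--         return 1
--     if d < -margin:
--         return -1
--     return 0
-- ===== Notes on version B (the rewrite author's own statement) =====
-- stated objective: simpler
-- what changed: B drops the whole loop and the res table: since only res[0] is returned, it compares just the head lengths directly with a slack margin (1 unless has_high_coverage).
import Mathlib
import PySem

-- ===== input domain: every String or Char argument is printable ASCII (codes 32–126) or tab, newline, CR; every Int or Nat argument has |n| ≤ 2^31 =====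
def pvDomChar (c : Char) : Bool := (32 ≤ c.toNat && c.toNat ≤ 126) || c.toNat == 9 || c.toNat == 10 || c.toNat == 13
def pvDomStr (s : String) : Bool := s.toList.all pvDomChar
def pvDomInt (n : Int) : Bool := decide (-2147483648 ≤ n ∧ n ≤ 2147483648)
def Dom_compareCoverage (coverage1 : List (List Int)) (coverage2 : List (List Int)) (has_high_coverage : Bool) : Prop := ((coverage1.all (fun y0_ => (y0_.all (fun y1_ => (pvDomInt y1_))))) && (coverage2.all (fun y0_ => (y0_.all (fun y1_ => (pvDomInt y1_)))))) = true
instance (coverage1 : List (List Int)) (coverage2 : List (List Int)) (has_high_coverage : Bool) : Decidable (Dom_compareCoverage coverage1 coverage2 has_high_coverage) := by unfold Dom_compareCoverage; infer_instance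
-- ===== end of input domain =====

-- B replaces A's loop-and-table with a direct comparison of the two head lengths (simpler).

-- ===== PORT A =====
-- one iteration of A's loop body (res[i] = … via pySetD; reads via pyGetD, in range under Pre_)
def ccStep (coverage1 coverage2 : List (List Int)) (has_high_coverage : Bool)
    (res : List Int) (i : Int) : List Int :=
  let l1 : Int := (PySem.List.pyGetD coverage1 i []).length
  let l2 : Int := (PySem.List.pyGetD coverage2 i []).length
  if i == 0 && !has_high_coverage then
    if l1 + 1 < l2 then PySem.List.pySetD res i 1
    else if l1 > l2 + 1 then PySem.List.pySetD res i (-1)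
    else res
  else
    if l1 < l2 then PySem.List.pySetD res i 1
    else if l1 > l2 then PySem.List.pySetD res i (-1)
    else res

def compareCoverage (coverage1 : List (List Int)) (coverage2 : List (List Int)) (has_high_coverage : Bool) : Int :=
  let res : List Int := [0, 0, 0, 0]
  let res := (PySem.List.pyRange 0 (coverage1.length : Int) 1).foldl
      (ccStep coverage1 coverage2 has_high_coverage) res
  PySem.List.pyGetD res 0 0

-- ===== PORT B =====
def compareCoverage_alt (coverage1 : List (List Int)) (coverage2 : List (List Int)) (has_high_coverage : Bool) : Int :=
  if coverage1 = [] then 0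
  else
    let margin : Int := if has_high_coverage then 0 else 1
    let d : Int := ((PySem.List.pyGetD coverage2 0 []).length : Int)
                 - ((PySem.List.pyGetD coverage1 0 []).length : Int)
    if d > margin then 1
    else if d < -margin then -1
    else 0

-- ===== PRECONDITION & SPEC =====
-- Pre_ = exactly the inputs where A returns: A raises IndexError when coverage1 is non-empty
-- and coverage2 is shorter (reading coverage2[i]), or when some slot i >= 4 has differing
-- lengths (writing res[i] into the 4-cell table).
def Pre_compareCoverage (coverage1 : List (List Int)) (coverage2 : List (List Int)) (has_high_coverage : Bool) : Prop :=
  coverage1 = [] ∨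
    (coverage1.length ≤ coverage2.length ∧
     ((coverage1.zip coverage2).drop 4).all (fun p => p.1.length == p.2.length) = true)
instance (coverage1 : List (List Int)) (coverage2 : List (List Int)) (has_high_coverage : Bool) : Decidable (Pre_compareCoverage coverage1 coverage2 has_high_coverage) := by unfold Pre_compareCoverage; infer_instance

def pvWitness_compareCoverage : List (List Int) × List (List Int) × Bool :=
  ([[1, 2], [3]], [[4, 5, 6], [7], [8]], false)

def Spec_compareCoverage (coverage1 : List (List Int)) (coverage2 : List (List Int)) (has_high_coverage : Bool) (out : Int) : Prop := out = compareCoverage_alt coverage1 coverage2 has_high_coverage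
instance (coverage1 : List (List Int)) (coverage2 : List (List Int)) (has_high_coverage : Bool) (out : Int) : Decidable (Spec_compareCoverage coverage1 coverage2 has_high_coverage out) := by unfold Spec_compareCoverage; infer_instance

-- ===== CLAIM (what is proved, stated in full; the proofs are below) =====
def Claim_equal_compareCoverage : Prop := ∀ (coverage1 : List (List Int)) (coverage2 : List (List Int)) (has_high_coverage : Bool), Dom_compareCoverage coverage1 coverage2 has_high_coverage → Pre_compareCoverage coverage1 coverage2 has_high_coverage → Spec_compareCoverage coverage1 coverage2 has_high_coverage (compareCoverage coverage1 coverage2 has_high_coverage)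

-- ===== LEMMAS AND PROOFS =====

-- iterations with index ≥ 1 never touch res[0]
lemma ccStep_keeps_zero (c1 c2 : List (List Int)) (h : Bool) (res : List Int) (i : Int)
    (hi : 1 ≤ i) : (ccStep c1 c2 h res i)[0]? = res[0]? := by
  have hne : i.toNat ≠ 0 := by omega
  have h0 : (i == 0) = false := by simp; omega
  unfold ccStep
  simp only [h0, Bool.false_and, Bool.false_eq_true, if_false,
    PySem.List.pySetD_of_nonneg res _ (by omega : (0:Int) ≤ i)]
  split_ifs <;> simp [hne]

lemma fold_keeps_zero (c1 c2 : List (List Int)) (h : Bool) :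
    ∀ (L : List Int) (res : List Int), (∀ i ∈ L, 1 ≤ i) →
      (L.foldl (ccStep c1 c2 h) res)[0]? = res[0]? := by
  intro L
  induction L with
  | nil => intro res _; rfl
  | cons a L ih =>
      intro res hmem
      rw [List.foldl_cons, ih _ (fun i hi => hmem i (List.mem_cons_of_mem a hi)),
          ccStep_keeps_zero c1 c2 h res a (hmem a (List.mem_cons_self))]

-- ===== VERDICT (by name: the statement is the Claim_ definition above) =====
theorem compareCoverage_spec : Claim_equal_compareCoverage := by
  intro c1 c2 h _dom pre
  unfold Spec_compareCoverage
  rcases c1 with _ | ⟨x, rest⟩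
  · simp [compareCoverage, compareCoverage_alt, PySem.List.pyRange_one_eq_nil (le_refl 0)]
  · rcases pre with hnil | ⟨hlen, _hsl⟩
    · exact absurd hnil (by simp)
    rcases c2 with _ | ⟨y, rest2⟩
    · simp at hlen
    -- A's loop: the first iteration fixes res[0]; the rest never touch it
    have hlt : (0 : Int) < ((x :: rest).length : Int) := by
      exact_mod_cast Nat.succ_pos rest.length
    simp only [compareCoverage, PySem.List.pyRange_one_cons hlt, List.foldl_cons,
        PySem.List.pyGetD_zero]
    have hres0 := fold_keeps_zero (x :: rest) (y :: rest2) h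
        (PySem.List.pyRange 1 ((x :: rest).length : Int) 1)
        (ccStep (x :: rest) (y :: rest2) h [0, 0, 0, 0] 0)
        (fun i hi => ((PySem.List.mem_pyRange_one).1 hi).1)
    simp only [zero_add]
    rw [List.getD_eq_getElem?_getD, hres0]
    unfold ccStep compareCoverage_alt
    simp only [PySem.List.pyGetD_zero_cons, beq_self_eq_true, Bool.true_and]
    cases h <;>
      · simp only [Bool.not_false, Bool.not_true, if_true,
          show PySem.List.pySetD [(0:Int),0,0,0] 0 1 = [1,0,0,0] from rfl,
          show PySem.List.pySetD [(0:Int),0,0,0] 0 (-1) = [-1,0,0,0] from rfl]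
        split_ifs <;> simp_all <;> omega
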